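-- pv_equiv track=rewrite | github.com/kongshuilinhua/python- | python/蒜法板子/数据结构/二维数点.py | solve
-- ===== SOURCE A (Python) =====
-- from bisect import bisect_left
--
-- class FenwickTree:
--     def __init__(self, x):
--         """transform list into BIT"""
--         self.bit = x
--         for i in range(len(x)):
--             j = i | (i + 1)
--             if j < len(x):
--                 x[j] += x[i]
--
--     def update(self, idx, x):
--         """updates bit[idx] += x"""
--         while idx < len(self.bit):
--             self.bit[idx] += x
--             idx |= idx + 1
--
--     def query(self, end):
--         """calc sum(bit[:end])"""
--         x = 0
--         while end:
--             x += self.bit[end - 1]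
--             end &= end - 1
--         return x
--
-- def solve(pts, qrs):
--     n, m = len(pts), len(qrs)
--     # 离散化坐标y
--     Y = set()
--     for x, y in pts:
--         Y.add(y)
--     for x1, y1, x2, y2 in qrs:
--         Y.add(y1)
--         Y.add(y2)
--     Y = sorted(Y)
--
--     op = []
--     for i, (x, y) in enumerate(pts):
--         y = bisect_left(Y, y) + 1
--         op.append((x, y, i, 0))    # 加点操作
--
--     # 矩形面积计算原理：s[x2][y2] + s[x1 - 1][y1 - 1] - s[x1 - 1][y2] - s[x2][y1 - 1]
--     for i, (x1, y1, x2, y2) in enumerate(qrs):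
--         y1 = bisect_left(Y, y1) + 1
--         y2 = bisect_left(Y, y2) + 1
--         op.append((x2, y2, i, 1))
--         op.append((x1 - 1, y1 - 1, i, 1))
--         op.append((x1 - 1, y2, i, 2))
--         op.append((x2, y1 - 1, i, 2))
--
--     op.sort(key=lambda x:x[0])  # 按照x坐标排序，其余相对位置不变
--
--     bit = FenwickTree([0] * (len(Y) + 10))
--     res = [0] * m
--     for i, (x, y, idx, t) in enumerate(op):
--         if t == 0:
--             bit.update(y, 1)
--         elif t == 1:
--             res[idx] += bit.query(y + 1)
--         else:
--             res[idx] -= bit.query(y + 1)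
--     return res
-- ===== SOURCE B (Python) =====
-- def solve(pts, qrs):
--     # Direct per-query counting: each query's answer is the signed sum, over all
--     # points, of ((x <= x2) - (x < x1)) * ((y <= y2) - (y < y1)).
--     res = []
--     for x1, y1, x2, y2 in qrs:
--         s = 0
--         for x, y in pts:
--             s += ((x <= x2) - (x < x1)) * ((y <= y2) - (y < y1))
--         res.append(s)
--     return res
-- ===== Notes on version B (the rewrite author's own statement) =====
-- stated objective: simpler
-- what changed: Replaced the whole offline pipeline (y-coordinate compression, four corner events per query, stable sort of events by x, Fenwick-tree sweep) by a direct per-query count: each answer is the signed sum over all points of ((x<=x2)-(x<x1))*((y<=y2)-(y<y1)).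
import Mathlib
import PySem

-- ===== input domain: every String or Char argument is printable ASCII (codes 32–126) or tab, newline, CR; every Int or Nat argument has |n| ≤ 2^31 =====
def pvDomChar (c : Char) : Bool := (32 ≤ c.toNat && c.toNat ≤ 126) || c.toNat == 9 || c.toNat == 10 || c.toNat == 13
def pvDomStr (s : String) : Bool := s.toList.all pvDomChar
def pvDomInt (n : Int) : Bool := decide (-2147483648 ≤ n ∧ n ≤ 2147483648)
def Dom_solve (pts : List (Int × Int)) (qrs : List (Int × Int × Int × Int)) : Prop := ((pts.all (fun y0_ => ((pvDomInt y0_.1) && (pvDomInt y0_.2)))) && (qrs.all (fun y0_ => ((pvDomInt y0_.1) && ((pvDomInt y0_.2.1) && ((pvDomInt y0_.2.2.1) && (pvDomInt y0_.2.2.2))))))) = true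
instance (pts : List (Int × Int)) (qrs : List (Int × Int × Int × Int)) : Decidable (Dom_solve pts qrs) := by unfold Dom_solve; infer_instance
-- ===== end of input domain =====

-- B replaces A's coordinate-compression + event-sort + Fenwick sweep by a direct
-- per-query signed count over the points (simpler, not faster).

-- ===== PORT A =====
-- Helpers: the FenwickTree methods of A. All indices reaching them in `solve`
-- are nonnegative, so they are kept as Nat (Python's int while-loops, exact here).

-- termination helper for the `idx |= idx + 1` loop (cited by decreasing_by)
lemma pv_lt_lor_succ (y : Nat) : y < y ||| (y + 1) := by
  induction y using Nat.strong_induction_on with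
  | _ y ih =>
    rcases Nat.even_or_odd y with ⟨a, ha⟩ | ⟨a, ha⟩
    · subst ha
      rw [show a + a = 2*a by ring]
      have hd : ((2*a) ||| (2*a+1))/2 = (2*a)/2 ||| (2*a+1)/2 := Nat.or_div_two
      rw [show (2*a)/2 = a by omega, show (2*a+1)/2 = a by omega, Nat.or_self] at hd
      have hm := @Nat.or_mod_two_eq_one (2*a) (2*a+1)
      omega
    · subst ha
      rw [show 2*a+1+1 = 2*a+2 by ring]
      have hd : ((2*a+1) ||| (2*a+2))/2 = (2*a+1)/2 ||| (2*a+2)/2 := Nat.or_div_two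
      rw [show (2*a+1)/2 = a by omega, show (2*a+2)/2 = a+1 by omega] at hd
      have hm := @Nat.or_mod_two_eq_one (2*a+1) (2*a+2)
      have := ih a (by omega)
      omega

-- FenwickTree.__init__ : transform list into BIT
def fenInit (x : List Int) : List Int :=
  (PySem.List.pyRange 0 (PySem.List.len x) 1).foldl
    (fun x i =>
      let j := PySem.Int.bor i (i + 1)
      if j < PySem.List.len x then
        PySem.List.pySetD x j (PySem.List.pyGetD x j 0 + PySem.List.pyGetD x i 0)
      else x) x

-- FenwickTree.update : while idx < len(bit): bit[idx] += x; idx |= idx + 1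
def fenUpdate (bit : List Int) (idx : Nat) (x : Int) : List Int :=
  if h : idx < bit.length then
    fenUpdate (bit.set idx (bit.getD idx 0 + x)) (idx ||| (idx + 1)) x
  else bit
termination_by bit.length - idx
decreasing_by simp only [List.length_set]; have := pv_lt_lor_succ idx; omega

-- FenwickTree.query : x = 0; while end: x += bit[end-1]; end &= end - 1
def fenQueryLoop (bit : List Int) (x : Int) (e : Nat) : Int :=
  if e = 0 then x else fenQueryLoop bit (x + bit.getD (e - 1) 0) (e &&& (e - 1))
termination_by e
decreasing_by
  have : e &&& (e-1) ≤ e - 1 := Nat.and_le_right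
  rename_i h; omega

def solve (pts : List (Int × Int)) (qrs : List (Int × Int × Int × Int)) : List Int :=
  let m := qrs.length
  let Y0 : PySem.Set Int := pts.foldl (fun s p => PySem.Set.add s p.2) PySem.Set.empty
  let Y1 : PySem.Set Int :=
    qrs.foldl (fun s q => PySem.Set.add (PySem.Set.add s q.2.1) q.2.2.2) Y0
  let Y : List Int := PySem.List.sorted Y1 (fun y => y) false
  let op1 : List (Int × Nat × Int × Nat) :=
    (PySem.List.enumerate pts 0).foldl
      (fun acc ip => acc ++ [(ip.2.1, PySem.List.bisectLeft Y ip.2.2 + 1, ip.1, 0)]) []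
  let op : List (Int × Nat × Int × Nat) :=
    (PySem.List.enumerate qrs 0).foldl
      (fun acc iq =>
        let y1 := PySem.List.bisectLeft Y iq.2.2.1 + 1
        let y2 := PySem.List.bisectLeft Y iq.2.2.2.2 + 1
        acc ++ [(iq.2.2.2.1, y2, iq.1, 1), (iq.2.1 - 1, y1 - 1, iq.1, 1),
                (iq.2.1 - 1, y2, iq.1, 2), (iq.2.2.2.1, y1 - 1, iq.1, 2)]) op1
  let opS := PySem.List.sorted op (fun e => e.1) false
  let bit0 := fenInit (List.replicate (Y.length + 10) (0 : Int))
  let res0 : List Int := List.replicate m 0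
  let fin := (PySem.List.enumerate opS 0).foldl
    (fun (s : List Int × List Int) ie =>
      let e := ie.2
      if e.2.2.2 = 0 then (fenUpdate s.1 e.2.1 1, s.2)
      else if e.2.2.2 = 1 then
        (s.1, PySem.List.pySetD s.2 e.2.2.1
                (PySem.List.pyGetD s.2 e.2.2.1 0 + fenQueryLoop s.1 0 (e.2.1 + 1)))
      else
        (s.1, PySem.List.pySetD s.2 e.2.2.1
                (PySem.List.pyGetD s.2 e.2.2.1 0 - fenQueryLoop s.1 0 (e.2.1 + 1)))) (bit0, res0)
  fin.2

-- ===== PORT B =====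
def solve_alt (pts : List (Int × Int)) (qrs : List (Int × Int × Int × Int)) : List Int :=
  qrs.foldl
    (fun res q =>
      res ++ [pts.foldl
        (fun s p =>
          s + ((if p.1 ≤ q.2.2.1 then (1 : Int) else 0) - (if p.1 < q.1 then 1 else 0)) *
              ((if p.2 ≤ q.2.2.2 then (1 : Int) else 0) - (if p.2 < q.2.1 then 1 else 0))) 0]) []

-- ===== PRECONDITION & SPEC =====
def Spec_solve (pts : List (Int × Int)) (qrs : List (Int × Int × Int × Int)) (out : List Int) : Prop := out = solve_alt pts qrs
instance (pts : List (Int × Int)) (qrs : List (Int × Int × Int × Int)) (out : List Int) : Decidable (Spec_solve pts qrs out) := by unfold Spec_solve; infer_instance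

-- ===== CLAIM (what is proved, stated in full; the proofs are below) =====
def Claim_equal_solve : Prop := ∀ (pts : List (Int × Int)) (qrs : List (Int × Int × Int × Int)), Dom_solve pts qrs → Spec_solve pts qrs (solve pts qrs)

-- ===== LEMMAS AND PROOFS =====



lemma pr1 (b:Nat) : (2*b+1) &&& (2*b+2) = 2*(b &&& (b+1)) := by
  have hd : ((2*b+1) &&& (2*b+2))/2 = (2*b+1)/2 &&& (2*b+2)/2 := Nat.and_div_two
  rw [show (2*b+1)/2 = b by omega, show (2*b+2)/2 = b+1 by omega] at hd
  have hm := @Nat.and_mod_two_eq_one (2*b+1) (2*b+2)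
  omega

lemma pr2 (a:Nat) : (2*a+1) ||| (2*a+2) = 2*(a ||| (a+1)) + 1 := by
  have hd : ((2*a+1) ||| (2*a+2))/2 = (2*a+1)/2 ||| (2*a+2)/2 := Nat.or_div_two
  rw [show (2*a+1)/2 = a by omega, show (2*a+2)/2 = a+1 by omega] at hd
  have hm := @Nat.or_mod_two_eq_one (2*a+1) (2*a+2)
  omega

lemma pr3 (a:Nat) : (2*a) ||| (2*a+1) = 2*a+1 := by
  have hd : ((2*a) ||| (2*a+1))/2 = (2*a)/2 ||| (2*a+1)/2 := Nat.or_div_two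
  rw [show (2*a)/2 = a by omega, show (2*a+1)/2 = a by omega, Nat.or_self] at hd
  have hm := @Nat.or_mod_two_eq_one (2*a) (2*a+1)
  omega

lemma pr4 (b:Nat) : (2*b) &&& (2*b+1) = 2*b := by
  have hd : ((2*b) &&& (2*b+1))/2 = (2*b)/2 &&& (2*b+1)/2 := Nat.and_div_two
  rw [show (2*b)/2 = b by omega, show (2*b+1)/2 = b by omega, Nat.and_self] at hd
  have hm := @Nat.and_mod_two_eq_one (2*b) (2*b+1)
  omega

lemma lor_succ_odd (y : Nat) : (y ||| (y+1)) % 2 = 1 := by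
  have hm := @Nat.or_mod_two_eq_one y (y+1)
  omega


lemma chain_step_le (j y : Nat) (h1 : j &&& (j+1) ≤ y) (h2 : y < j) : (y ||| (y+1)) ≤ j := by
  induction j using Nat.strong_induction_on generalizing y with
  | _ j ih =>
    rcases Nat.even_or_odd j with ⟨b, hb⟩ | ⟨b, hb⟩
    · subst hb
      rw [show b+b = 2*b by ring] at h1 h2 ⊢
      rw [pr4] at h1; omega
    · subst hb
      rw [show 2*b+1+1 = 2*b+2 by ring] at h1
      rw [pr1] at h1
      rcases Nat.even_or_odd y with ⟨a, ha⟩ | ⟨a, ha⟩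
      · subst ha; rw [show a+a = 2*a by ring] at *; rw [pr3]; omega
      · subst ha
        rw [show 2*a+1+1 = 2*a+2 by ring, pr2]
        have := ih b (by omega) a (by omega) (by omega)
        omega

lemma chain_step_ge (j y : Nat) (h1 : j &&& (j+1) ≤ y ||| (y+1)) (h2 : y ||| (y+1) ≤ j)
    (h3 : y < j) : j &&& (j+1) ≤ y := by
  induction j using Nat.strong_induction_on generalizing y with
  | _ j ih =>
    rcases Nat.even_or_odd j with ⟨b, hb⟩ | ⟨b, hb⟩
    · subst hb
      rw [show b+b = 2*b by ring] at *
      rw [pr4] at h1 ⊢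
      have := lor_succ_odd y; omega
    · subst hb
      rw [show 2*b+1+1 = 2*b+2 by ring] at *
      rw [pr1] at h1 ⊢
      rcases Nat.even_or_odd y with ⟨a, ha⟩ | ⟨a, ha⟩
      · subst ha; rw [show a+a = 2*a by ring] at *; rw [pr3] at h1 h2; omega
      · subst ha
        rw [show 2*a+1+1 = 2*a+2 by ring, pr2] at h1 h2
        have := ih b (by omega) a (by omega) (by omega) (by omega)
        omega



def chainMem (y j : Nat) : Bool :=
  if j < y then false else if j = y then true else chainMem (y ||| (y+1)) j
termination_by j - y
decreasing_by have := pv_lt_lor_succ y; omega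

lemma chainMem_iff : ∀ (m y j : Nat), j - y ≤ m → (chainMem y j = true ↔ (j &&& (j+1) ≤ y ∧ y ≤ j)) := by
  intro m
  induction m with
  | zero =>
    intro y j h
    rw [chainMem]
    rcases Nat.lt_trichotomy j y with hlt | heq | hgt
    · simp [hlt]
    · simp [heq]
      exact Nat.and_le_left
    · omega
  | succ m ih =>
    intro y j h
    rw [chainMem]
    rcases Nat.lt_trichotomy j y with hlt | heq | hgt
    · simp [hlt]
    · simp [heq]
      exact Nat.and_le_left
    · have hne : ¬ j < y := by omega
      have hne2 : ¬ j = y := by omega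
      simp only [hne, hne2, if_false]
      have hlt' := pv_lt_lor_succ y
      rw [ih (y ||| (y+1)) j (by omega)]
      constructor
      · rintro ⟨h1, h2⟩
        exact ⟨chain_step_ge j y h1 h2 hgt, by omega⟩
      · rintro ⟨h1, h2⟩
        exact ⟨by omega, chain_step_le j y h1 hgt⟩


lemma fenUpdate_length (bit : List Int) (idx : Nat) (x : Int) :
    (fenUpdate bit idx x).length = bit.length := by
  rw [fenUpdate]
  split
  · rw [fenUpdate_length]; simp
  · rfl
termination_by bit.length - idx
decreasing_by simp only [List.length_set]; have := pv_lt_lor_succ idx; omega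

lemma fenUpdate_getD (bit : List Int) (y : Nat) (x : Int) (j : Nat) (hj : j < bit.length) :
    (fenUpdate bit y x).getD j 0 = bit.getD j 0 + (if chainMem y j then x else 0) := by
  rw [fenUpdate]
  split
  · rename_i hy
    rw [fenUpdate_getD _ _ _ j (by simpa using hj)]
    have hstep := pv_lt_lor_succ y
    by_cases hjy : j = y
    · subst hjy
      have hc1 : chainMem j j = true := by
        rw [chainMem_iff (j - j) j j (by omega)]
        exact ⟨Nat.and_le_left, le_refl _⟩
      have hc2 : ¬ (chainMem (j ||| (j+1)) j = true) := by
        rw [chainMem_iff (j - (j ||| (j+1))) _ j (by omega)]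
        omega
      simp only [hc1, if_true, hc2, if_false]
      rw [List.getD_eq_getElem?_getD, List.getElem?_set_self (by omega)]
      rw [List.getD_eq_getElem?_getD]
      simp [List.getElem?_eq_getElem hj]
    · have hc : chainMem (y ||| (y+1)) j = chainMem y j := by
        have e1 := chainMem_iff (j - (y ||| (y+1))) (y ||| (y+1)) j (by omega)
        have e2 := chainMem_iff (j - y) y j (by omega)
        by_cases h1 : chainMem (y ||| (y+1)) j = true <;>
          by_cases h2 : chainMem y j = true
        · rw [h1, h2]
        · exfalso
          have hp := e1.mp h1
          by_cases hyj : y < j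
          · exact h2 (e2.mpr ⟨chain_step_ge j y hp.1 hp.2 hyj, by omega⟩)
          · omega
        · exfalso
          have hp := e2.mp h2
          have hyj : y < j := by omega
          have hyle := chain_step_le j y hp.1 hyj
          exact h1 (e1.mpr ⟨by omega, hyle⟩)
        · rw [Bool.not_eq_true] at h1 h2
          rw [h1, h2]
      rw [hc]
      congr 1
      simp [List.getD_eq_getElem?_getD, List.getElem?_set_ne (show y ≠ j by omega)]
  · rename_i hy
    have hc : ¬ (chainMem y j = true) := by
      rw [chainMem_iff (j - y) y j (by omega)]
      omega
    simp [hc]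
termination_by bit.length - y
decreasing_by simp only [List.length_set]; have := pv_lt_lor_succ y; omega

lemma fenQueryLoop_add (bit : List Int) (x c : Int) (e : Nat) :
    fenQueryLoop bit (x + c) e = fenQueryLoop bit x e + c := by
  induction e using Nat.strong_induction_on generalizing x with
  | _ e ih =>
    by_cases h : e = 0
    · subst h
      conv_lhs => rw [fenQueryLoop]
      conv_rhs => rw [fenQueryLoop]
      simp
    · conv_lhs => rw [fenQueryLoop]
      conv_rhs => rw [fenQueryLoop]
      simp only [h, if_false]
      have hlt : e &&& (e-1) < e := by have : e &&& (e-1) ≤ e-1 := Nat.and_le_right; omega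
      rw [show x + c + bit.getD (e-1) 0 = x + bit.getD (e-1) 0 + c by ring]
      exact ih _ hlt _

lemma fenQuery_update (bit : List Int) (y : Nat) (v : Int) (x : Int) (e : Nat)
    (he : e ≤ bit.length) :
    fenQueryLoop (fenUpdate bit y v) x e = fenQueryLoop bit x e + (if y < e then v else 0) := by
  induction e using Nat.strong_induction_on generalizing x with
  | _ e ih =>
    by_cases h : e = 0
    · subst h
      conv_lhs => rw [fenQueryLoop]
      conv_rhs => rw [fenQueryLoop]
      simp
    · conv_lhs => rw [fenQueryLoop]
      conv_rhs => rw [fenQueryLoop]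
      simp only [h, if_false]
      have hlt : e &&& (e-1) < e := by have : e &&& (e-1) ≤ e-1 := Nat.and_le_right; omega
      rw [fenUpdate_getD bit y v (e-1) (by omega)]
      rw [show x + (bit.getD (e-1) 0 + if chainMem y (e-1) then v else 0)
            = (x + bit.getD (e-1) 0) + (if chainMem y (e-1) then v else 0) by ring]
      rw [fenQueryLoop_add]
      rw [ih _ hlt _ (by omega)]
      have hlow : (e-1) &&& ((e-1)+1) = e &&& (e-1) := by
        rw [show (e-1)+1 = e by omega, Nat.and_comm]
      have hcm := chainMem_iff ((e-1) - y) y (e-1) (by omega)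
      rw [hlow] at hcm
      have hle : e &&& (e-1) ≤ e - 1 := Nat.and_le_right
      by_cases hc : chainMem y (e-1) = true
      · have hp := hcm.mp hc
        rw [if_pos hc, if_neg (show ¬ y < e &&& (e-1) by omega),
            if_pos (show y < e by omega)]
        ring
      · have hp := mt hcm.mpr hc
        rw [if_neg hc]
        by_cases hy : y < e
        · rw [if_pos (show y < e &&& (e-1) by omega), if_pos hy]
          ring
        · rw [if_neg (show ¬ y < e &&& (e-1) by omega), if_neg hy]
          ring


abbrev Ev : Type := Int × Nat × Int × Nat

def EvRel (a b : Ev) : Prop := a.1 ≤ b.1 ∧ (a.2.2.2 ≠ 0 → b.2.2.2 = 0 → a.1 < b.1)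

lemma insertBy_pairwise {α : Type} (key : α → Int) (R : α → α → Prop) (e : α) (acc : List α)
    (hacc : acc.Pairwise R)
    (hle : ∀ a b, R a b → key a ≤ key b)
    (h1 : ∀ y ∈ acc, ¬ key e < key y → R y e)
    (h2 : ∀ y, key e < key y → R e y) :
    (PySem.List.insertBy (fun a b => decide (key a < key b)) e acc).Pairwise R := by
  induction acc with
  | nil => simp [PySem.List.insertBy]
  | cons y ys ih =>
    rw [List.pairwise_cons] at hacc
    obtain ⟨hy, hys⟩ := hacc
    rw [PySem.List.insertBy]
    by_cases hb : key e < key y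
    · simp only [hb, decide_true, if_true]
      rw [List.pairwise_cons]
      refine ⟨?_, List.pairwise_cons.mpr ⟨hy, hys⟩⟩
      intro z hz
      rcases List.mem_cons.mp hz with rfl | hz'
      · exact h2 z hb
      · exact h2 z (lt_of_lt_of_le hb (hle y z (hy z hz')))
    · simp only [hb, decide_false, Bool.false_eq_true, if_false]
      rw [List.pairwise_cons]
      constructor
      · intro z hz
        rcases (PySem.List.mem_insertBy _ _ _ _).mp hz with rfl | hz'
        · exact h1 y (List.mem_cons_self) hb
        · exact hy z hz'
      · exact ih hys (fun z hz hlt => h1 z (List.mem_cons_of_mem _ hz) hlt)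

-- phase 1: folding insert-events only
lemma phase1 (P : List Ev) : ∀ (acc : List Ev),
    (∀ e ∈ P, e.2.2.2 = 0) → (∀ e ∈ acc, e.2.2.2 = 0) → acc.Pairwise EvRel →
    (∀ e ∈ P.foldl (fun acc x => PySem.List.insertBy
        (fun a b => decide ((fun e : Ev => e.1) a < (fun e : Ev => e.1) b)) x acc) acc,
      e.2.2.2 = 0) ∧
    (P.foldl (fun acc x => PySem.List.insertBy
        (fun a b => decide ((fun e : Ev => e.1) a < (fun e : Ev => e.1) b)) x acc) acc).Pairwise EvRel := by
  induction P with
  | nil => intro acc _ ha hp; exact ⟨ha, hp⟩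
  | cons e P ih =>
    intro acc hP ha hp
    simp only [List.foldl_cons]
    apply ih
    · intro z hz; exact hP z (List.mem_cons_of_mem _ hz)
    · intro z hz
      rcases (PySem.List.mem_insertBy _ _ _ _).mp hz with rfl | hz'
      · exact hP z List.mem_cons_self
      · exact ha z hz'
    · apply insertBy_pairwise _ _ _ _ hp (fun a b h => h.1)
      · intro y hy hlt
        refine ⟨by omega, fun hq _ => absurd (ha y hy) hq⟩
      · intro y hlt
        exact ⟨le_of_lt hlt, fun _ _ => hlt⟩

-- phase 2: folding the remaining (query) events
lemma phase2 (Q : List Ev) : ∀ (acc : List Ev),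
    (∀ e ∈ Q, e.2.2.2 ≠ 0) → acc.Pairwise EvRel →
    (Q.foldl (fun acc x => PySem.List.insertBy
        (fun a b => decide ((fun e : Ev => e.1) a < (fun e : Ev => e.1) b)) x acc) acc).Pairwise EvRel := by
  induction Q with
  | nil => intro acc _ hp; exact hp
  | cons e Q ih =>
    intro acc hQ hp
    simp only [List.foldl_cons]
    apply ih
    · intro z hz; exact hQ z (List.mem_cons_of_mem _ hz)
    · apply insertBy_pairwise _ _ _ _ hp (fun a b h => h.1)
      · intro y hy hlt
        exact ⟨by omega, fun _ hq => absurd hq (hQ e List.mem_cons_self)⟩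
      · intro y hlt
        exact ⟨le_of_lt hlt, fun _ _ => hlt⟩

lemma sortedOp_pairwise (P Q : List Ev)
    (hP : ∀ e ∈ P, e.2.2.2 = 0) (hQ : ∀ e ∈ Q, e.2.2.2 ≠ 0) :
    (PySem.List.sorted (P ++ Q) (fun e => e.1) false).Pairwise EvRel := by
  rw [PySem.List.sorted_eq_foldl_insertBy, List.foldl_append]
  exact phase2 Q _ hQ (phase1 P [] hP (by simp) (by simp)).2

-- zero-state facts
lemma pv_getD_replicate0 (n i : Nat) : (List.replicate n (0:Int)).getD i 0 = 0 := by
  by_cases h : i < n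
  · rw [List.getD_replicate _ h]
  · rw [List.getD_eq_getElem?_getD, List.getElem?_eq_none (by simpa using h)]
    rfl

lemma fenQueryLoop_zeros (N : Nat) : ∀ (E : Nat) (x : Int),
    fenQueryLoop (List.replicate N (0:Int)) x E = x := by
  intro E
  induction E using Nat.strong_induction_on with
  | _ E ih =>
    intro x
    by_cases h : E = 0
    · subst h; rw [fenQueryLoop]; simp
    · rw [fenQueryLoop]
      simp only [h, if_false]
      have hlt : E &&& (E-1) < E := by
        have : E &&& (E-1) ≤ E - 1 := Nat.and_le_right
        omega
      rw [pv_getD_replicate0, add_zero]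
      exact ih _ hlt x

lemma pv_foldl_fixed {α β : Type} (f : β → α → β) (a : β) (l : List α)
    (h : ∀ x ∈ l, f a x = a) : l.foldl f a = a := by
  induction l with
  | nil => rfl
  | cons x l ih =>
    rw [List.foldl_cons, h x List.mem_cons_self]
    exact ih (fun z hz => h z (List.mem_cons_of_mem _ hz))

lemma fenInit_zeros (n : Nat) : fenInit (List.replicate n (0:Int)) = List.replicate n 0 := by
  rw [fenInit]
  apply pv_foldl_fixed
  intro i hi
  rw [PySem.List.len_eq, List.length_replicate] at hi
  rw [PySem.List.mem_pyRange_one] at hi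
  obtain ⟨k, rfl⟩ : ∃ k : Nat, i = (k : Int) := ⟨i.toNat, by omega⟩
  simp only []
  have hbor : PySem.Int.bor (k : Int) ((k:Int) + 1) = ((k ||| (k+1) : Nat) : Int) := by
    have := PySem.Int.bor_natCast k (k+1)
    push_cast at this ⊢
    exact this
  rw [hbor]
  split
  · rw [PySem.List.pySetD_of_nonneg _ _ (by positivity),
        PySem.List.pyGetD_natCast, PySem.List.pyGetD_natCast]
    simp only [Int.toNat_natCast, pv_getD_replicate0, add_zero]
    exact List.set_replicate_self
  · rfl

-- drop the unused enumerate index from the big fold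
lemma pv_foldl_enumerate_snd {α β : Type} (g : β → α → β) (l : List α) : ∀ (s : Int) (a : β),
    (PySem.List.enumerate l s).foldl (fun acc ie => g acc ie.2) a = l.foldl g a := by
  induction l with
  | nil => intro s a; rfl
  | cons x l ih =>
    intro s a
    rw [PySem.List.enumerate_cons, List.foldl_cons, List.foldl_cons, ih]

lemma pv_countP_enumerate {α : Type} (pred : α → Bool) (l : List α) : ∀ (s : Int),
    (PySem.List.enumerate l s).countP (fun ip => pred ip.2) = l.countP pred := by
  induction l with
  | nil => intro s; rfl
  | cons x l ih =>
    intro s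
    rw [PySem.List.enumerate_cons, List.countP_cons, List.countP_cons, ih]




def insEvs (l : List Ev) : List Ev := l.filter (fun e => e.2.2.2 == 0)
def bitSt (N : Nat) (l : List Ev) : List Int :=
  (insEvs l).foldl (fun b e => fenUpdate b e.2.1 1) (List.replicate N 0)
def cnt (all : List Ev) (e : Ev) : Int :=
  ((insEvs all).countP (fun p => decide (p.1 ≤ e.1) && decide (p.2.1 < e.2.1 + 1)) : Int)
def sgn (e : Ev) : Int := if e.2.2.2 = 1 then 1 else -1
def stepF : (List Int × List Int) → Ev → (List Int × List Int) := fun s e =>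
  if e.2.2.2 = 0 then (fenUpdate s.1 e.2.1 1, s.2)
  else if e.2.2.2 = 1 then
    (s.1, PySem.List.pySetD s.2 e.2.2.1 (PySem.List.pyGetD s.2 e.2.2.1 0 + fenQueryLoop s.1 0 (e.2.1 + 1)))
  else
    (s.1, PySem.List.pySetD s.2 e.2.2.1 (PySem.List.pyGetD s.2 e.2.2.1 0 - fenQueryLoop s.1 0 (e.2.1 + 1)))
def accum (all : List Ev) (res : List Int) (suf : List Ev) : List Int :=
  suf.foldl (fun r e => if e.2.2.2 = 0 then r
    else PySem.List.pySetD r e.2.2.1 (PySem.List.pyGetD r e.2.2.1 0 + sgn e * cnt all e)) res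

lemma accum_cons_ins (all : List Ev) (res : List Int) (e : Ev) (suf : List Ev)
    (h : e.2.2.2 = 0) : accum all res (e :: suf) = accum all res suf := by
  rw [accum, List.foldl_cons, if_pos h]; rfl

lemma accum_cons_q (all : List Ev) (res : List Int) (e : Ev) (suf : List Ev)
    (h : ¬ e.2.2.2 = 0) : accum all res (e :: suf)
      = accum all (PySem.List.pySetD res e.2.2.1
          (PySem.List.pyGetD res e.2.2.1 0 + sgn e * cnt all e)) suf := by
  rw [accum, List.foldl_cons, if_neg h]; rfl

lemma insEvs_nil : insEvs [] = [] := rfl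

lemma insEvs_append (l r : List Ev) : insEvs (l ++ r) = insEvs l ++ insEvs r :=
  List.filter_append ..

lemma insEvs_cons_ins (e : Ev) (l : List Ev) (h : e.2.2.2 = 0) :
    insEvs (e :: l) = e :: insEvs l := by
  simp [insEvs, List.filter_cons, h]

lemma insEvs_cons_q (e : Ev) (l : List Ev) (h : e.2.2.2 ≠ 0) :
    insEvs (e :: l) = insEvs l := by
  simp [insEvs, List.filter_cons, h]

lemma bitSt_append_ins (N : Nat) (pre : List Ev) (e : Ev) (h : e.2.2.2 = 0) :
    bitSt N (pre ++ [e]) = fenUpdate (bitSt N pre) e.2.1 1 := by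
  rw [bitSt, bitSt, insEvs_append, insEvs_cons_ins e [] h, insEvs_nil, List.foldl_append]
  rfl

lemma bitSt_append_q (N : Nat) (pre : List Ev) (e : Ev) (h : e.2.2.2 ≠ 0) :
    bitSt N (pre ++ [e]) = bitSt N pre := by
  rw [bitSt, bitSt, insEvs_append, insEvs_cons_q e [] h, insEvs_nil, List.append_nil]

lemma queryState (l : List Ev) : ∀ (bit : List Int) (x : Int) (E : Nat), E ≤ bit.length →
    fenQueryLoop (l.foldl (fun b e => fenUpdate b e.2.1 1) bit) x E
      = fenQueryLoop bit x E + (l.countP (fun p => decide (p.2.1 < E)) : Int) := by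
  induction l with
  | nil => intro bit x E _; simp
  | cons e l ih =>
    intro bit x E hE
    rw [List.foldl_cons, ih _ x E (by rw [fenUpdate_length]; exact hE),
        fenQuery_update bit e.2.1 1 x E hE, List.countP_cons]
    by_cases h : e.2.1 < E
    · simp [h]; push_cast; ring
    · simp [h]

-- the sweep: processing the sorted suffix equals the pure accumulation
lemma mainLemma (N : Nat) (suf : List Ev) : ∀ (pre : List Ev) (res : List Int),
    (pre ++ suf).Pairwise EvRel →
    (∀ e ∈ suf, e.2.2.2 ≠ 0 → e.2.1 + 1 ≤ N) →
    suf.foldl stepF (bitSt N pre, res) = (bitSt N (pre ++ suf), accum (pre ++ suf) res suf) := by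
  induction suf with
  | nil => intro pre res _ _; rw [List.append_nil]; rfl
  | cons e suf ih =>
    intro pre res hpw hbnd
    have hassoc : pre ++ e :: suf = (pre ++ [e]) ++ suf := by simp
    by_cases ht : e.2.2.2 = 0
    · have hstep : stepF (bitSt N pre, res) e = (bitSt N (pre ++ [e]), res) := by
        rw [stepF, if_pos ht, bitSt_append_ins N pre e ht]
      rw [List.foldl_cons, hstep, hassoc,
          ih (pre ++ [e]) res (by rw [← hassoc]; exact hpw)
             (fun z hz => hbnd z (List.mem_cons_of_mem _ hz)),
          accum_cons_ins _ _ _ _ ht]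
    · -- query event
      have hq : fenQueryLoop (bitSt N pre) 0 (e.2.1 + 1) = cnt (pre ++ e :: suf) e := by
        rw [bitSt, queryState (insEvs pre) _ 0 (e.2.1+1)
              (by rw [List.length_replicate]; exact hbnd e List.mem_cons_self ht)]
        have hz : fenQueryLoop (List.replicate N 0) 0 (e.2.1+1) = 0 := fenQueryLoop_zeros N (e.2.1+1) 0
        rw [hz, zero_add, cnt, insEvs_append, List.countP_append]
        have h1 : (insEvs pre).countP (fun p => decide (p.1 ≤ e.1) && decide (p.2.1 < e.2.1 + 1))
            = (insEvs pre).countP (fun p => decide (p.2.1 < e.2.1 + 1)) := by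
          apply List.countP_congr
          intro p hp
          have hpmem : p ∈ pre := List.mem_of_mem_filter hp
          have hrel : EvRel p e := by
            have := (List.pairwise_append.mp hpw).2.2 p hpmem e List.mem_cons_self
            exact this
          simp [hrel.1]
        have h2 : (insEvs (e :: suf)).countP
            (fun p => decide (p.1 ≤ e.1) && decide (p.2.1 < e.2.1 + 1)) = 0 := by
          rw [List.countP_eq_zero]
          intro p hp
          have hpmem : p ∈ e :: suf := List.mem_of_mem_filter hp
          have hpins : p.2.2.2 = 0 := by
            have := List.of_mem_filter hp
            simpa using this
          have hpsuf : p ∈ suf := by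
            rcases List.mem_cons.mp hpmem with rfl | h
            · exact absurd hpins ht
            · exact h
          have hrel : EvRel e p := by
            have hpw2 : (e :: suf).Pairwise EvRel := (List.pairwise_append.mp hpw).2.1
            exact (List.pairwise_cons.mp hpw2).1 p hpsuf
          have := hrel.2 ht hpins
          simp [show ¬ (p.1 ≤ e.1) by omega]
        rw [h1, h2]
        push_cast
        ring
      have hstep : stepF (bitSt N pre, res) e
          = (bitSt N (pre ++ [e]),
             PySem.List.pySetD res e.2.2.1
               (PySem.List.pyGetD res e.2.2.1 0 + sgn e * cnt (pre ++ e :: suf) e)) := by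
        rw [stepF]
        simp only [if_neg ht]
        rw [bitSt_append_q N pre e ht]
        by_cases h1 : e.2.2.2 = 1
        · rw [if_pos h1, hq, sgn, if_pos h1, one_mul]
        · rw [if_neg h1, hq, sgn, if_neg h1, neg_one_mul, ← sub_eq_add_neg]
      rw [List.foldl_cons, hstep, hassoc,
          ih (pre ++ [e]) _ (by rw [← hassoc]; exact hpw)
             (fun z hz => hbnd z (List.mem_cons_of_mem _ hz)),
          accum_cons_q _ _ _ _ ht]

-- final value of the accumulated result list
lemma pv_set_getD (l : List Int) (k : Nat) (v : Int) (i : Nat) :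
    (l.set k v).getD i 0 = if i = k ∧ k < l.length then v else l.getD i 0 := by
  rw [List.getD_eq_getElem?_getD, List.getD_eq_getElem?_getD, List.getElem?_set]
  by_cases h1 : i = k
  · subst h1
    by_cases h2 : i < l.length
    · rw [if_pos rfl, if_pos h2, if_pos ⟨rfl, h2⟩]
      rfl
    · rw [if_pos rfl, if_neg h2, if_neg (fun h => h2 h.2),
          List.getElem?_eq_none (by omega)]
  · rw [if_neg (fun h => h1 h.symm), if_neg (fun h => h1 h.1)]

lemma accum_length (all : List Ev) : ∀ (suf : List Ev) (res : List Int),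
    (accum all res suf).length = res.length := by
  intro suf
  induction suf with
  | nil => intro res; rfl
  | cons e suf ih =>
    intro res
    by_cases ht : e.2.2.2 = 0
    · rw [accum_cons_ins _ _ _ _ ht, ih]
    · rw [accum_cons_q _ _ _ _ ht, ih, PySem.List.length_pySetD]

lemma accum_getD (all : List Ev) : ∀ (suf : List Ev) (res : List Int) (i : Nat),
    i < res.length →
    (∀ e ∈ suf, e.2.2.2 ≠ 0 → 0 ≤ e.2.2.1 ∧ e.2.2.1 < (res.length : Int)) →
    (accum all res suf).getD i 0 = res.getD i 0
      + (suf.map (fun e => if e.2.2.2 ≠ 0 ∧ e.2.2.1 = (i : Int) then sgn e * cnt all e else 0)).sum := by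
  intro suf
  induction suf with
  | nil => intro res i _ _; simp [accum]
  | cons e suf ih =>
    intro res i hi hidx
    by_cases ht : e.2.2.2 = 0
    · rw [accum_cons_ins _ _ _ _ ht,
          ih res i hi (fun z hz => hidx z (List.mem_cons_of_mem _ hz))]
      simp only [List.map_cons, List.sum_cons, ht]
      simp
    · obtain ⟨hnn, hlt⟩ := hidx e List.mem_cons_self ht
      rw [accum_cons_q _ _ _ _ ht, PySem.List.pySetD_of_nonneg _ _ hnn]
      have hklen : e.2.2.1.toNat < res.length := by omega
      rw [ih _ i (by rw [List.length_set]; exact hi)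
            (by intro z hz hzt
                rw [List.length_set]
                exact hidx z (List.mem_cons_of_mem _ hz) hzt)]
      rw [pv_set_getD, PySem.List.pyGetD_eq_getElem res 0 hnn hlt,
          ← List.getD_eq_getElem (d := 0)]
      simp only [List.map_cons, List.sum_cons]
      by_cases hik : i = e.2.2.1.toNat
      · have hcond : e.2.2.2 ≠ 0 ∧ e.2.2.1 = (i : Int) := ⟨ht, by omega⟩
        rw [if_pos ⟨hik, hklen⟩, if_pos hcond, hik]
        ring
      · have hcond : ¬ (e.2.2.2 ≠ 0 ∧ e.2.2.1 = (i : Int)) := by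
          rintro ⟨_, h⟩; omega
        rw [if_neg (by rintro ⟨h, _⟩; exact hik h), if_neg hcond, zero_add]


-- sum over a flatMap
lemma pv_sum_map_flatMap {α β : Type} (g : α → List β) (f : β → Int) (l : List α) :
    ((l.flatMap g).map f).sum = (l.map (fun x => ((g x).map f).sum)).sum := by
  induction l with
  | nil => rfl
  | cons x l ih => simp [List.flatMap_cons, ih]

-- single hit in an enumerate sum
lemma pv_sum_enum_single {α : Type} (G : α → Int) (t : Int) (pad : α) : ∀ (l : List α) (s : Int),
    ((PySem.List.enumerate l s).map (fun kq => if kq.1 = t then G kq.2 else 0)).sum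
      = if 0 ≤ t - s ∧ t - s < (l.length : Int) then G (l.getD (t - s).toNat pad) else 0 := by
  intro l
  induction l with
  | nil => intro s; simp
  | cons a l ih =>
    intro s
    rw [PySem.List.enumerate_cons, List.map_cons, List.sum_cons, ih (s+1)]
    by_cases hst : s = t
    · subst hst
      rw [if_pos rfl]
      rw [if_neg (by intro h; omega), if_pos (by simp only [List.length_cons]; push_cast; omega)]
      simp
    · rw [if_neg hst, zero_add]
      by_cases hrange : 0 ≤ t - s ∧ t - s < ((a :: l).length : Int)
      · rw [if_pos (by simp at hrange ⊢; omega), if_pos hrange]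
        have h1 : (t - s).toNat = (t - (s+1)).toNat + 1 := by omega
        rw [h1]
        rfl
      · rw [if_neg (by simp at hrange ⊢; omega), if_neg hrange]

-- bisect_left is strictly monotone on a sorted list
lemma pv_bl_mono (Y : List Int) (hY : Y.Pairwise (· ≤ ·)) (a b : Int) (hab : a ≤ b) :
    PySem.List.bisectLeft Y a ≤ PySem.List.bisectLeft Y b := by
  obtain ⟨hla, ha1, ha2⟩ := PySem.List.bisectLeft_spec Y a hY
  obtain ⟨hlb, hb1, hb2⟩ := PySem.List.bisectLeft_spec Y b hY
  by_contra hcon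
  push_neg at hcon
  have h1 := ha1 (PySem.List.bisectLeft Y b) (by omega) (by omega)
  have h2 := hb2 (PySem.List.bisectLeft Y b) (by omega) (by omega)
  omega

lemma pv_bl_strict (Y : List Int) (hY : Y.Pairwise (· ≤ ·)) (a b : Int)
    (ha : a ∈ Y) (hab : a < b) :
    PySem.List.bisectLeft Y a < PySem.List.bisectLeft Y b := by
  obtain ⟨hla, ha1, ha2⟩ := PySem.List.bisectLeft_spec Y a hY
  obtain ⟨hlb, hb1, hb2⟩ := PySem.List.bisectLeft_spec Y b hY
  obtain ⟨ia, hia, hYa⟩ := List.mem_iff_getElem.mp ha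
  have h1 : PySem.List.bisectLeft Y a ≤ ia := by
    by_contra hcon
    push_neg at hcon
    have := ha1 ia hia hcon
    omega
  have h2 : ia < PySem.List.bisectLeft Y b := by
    by_contra hcon
    push_neg at hcon
    have := hb2 ia hia hcon
    omega
  omega

lemma pv_bl_le_iff (Y : List Int) (hY : Y.Pairwise (· ≤ ·)) (a b : Int) (hb : b ∈ Y) :
    (PySem.List.bisectLeft Y a ≤ PySem.List.bisectLeft Y b ↔ a ≤ b) := by
  constructor
  · intro h
    by_contra hcon
    push_neg at hcon
    have := pv_bl_strict Y hY b a hb hcon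
    omega
  · exact pv_bl_mono Y hY a b

lemma pv_bl_lt_iff (Y : List Int) (hY : Y.Pairwise (· ≤ ·)) (a b : Int) (ha : a ∈ Y) :
    (PySem.List.bisectLeft Y a < PySem.List.bisectLeft Y b ↔ a < b) := by
  constructor
  · intro h
    by_contra hcon
    push_neg at hcon
    have := pv_bl_mono Y hY b a hcon
    omega
  · exact pv_bl_strict Y hY a b ha

-- counting algebra: the four inclusion-exclusion counts collapse to B's per-point sum
lemma pv_countAlgebra (x1 y1 x2 y2 : Int) : ∀ (l : List (Int × Int)),
    ((l.countP (fun p => decide (p.1 ≤ x2) && decide (p.2 ≤ y2)) : Int)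
      + (l.countP (fun p => decide (p.1 < x1) && decide (p.2 < y1)) : Int))
      - (l.countP (fun p => decide (p.1 < x1) && decide (p.2 ≤ y2)) : Int)
      - (l.countP (fun p => decide (p.1 ≤ x2) && decide (p.2 < y1)) : Int)
    = (l.map (fun p =>
        ((if p.1 ≤ x2 then (1:Int) else 0) - (if p.1 < x1 then 1 else 0)) *
        ((if p.2 ≤ y2 then (1:Int) else 0) - (if p.2 < y1 then 1 else 0)))).sum := by
  intro l
  induction l with
  | nil => simp
  | cons a l ih =>
    simp only [List.countP_cons, List.map_cons, List.sum_cons]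
    push_cast
    by_cases h1 : a.1 ≤ x2 <;> by_cases h2 : a.1 < x1 <;>
      by_cases h3 : a.2 ≤ y2 <;> by_cases h4 : a.2 < y1 <;>
      simp only [h1, h2, h3, h4, decide_true, decide_false, Bool.true_and, Bool.false_and,
        Bool.and_true, Bool.and_false, if_true, if_false] <;>
      push_cast <;> omega

-- cnt only reads the x- and y-fields of the event
lemma pv_cnt_perm (l1 l2 : List Ev) (h : l1.Perm l2) (e : Ev) : cnt l1 e = cnt l2 e := by
  rw [cnt, cnt]
  unfold insEvs
  exact congrArg Nat.cast
    (List.Perm.countP_eq _ (h.filter (fun e => e.2.2.2 == 0)))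

-- Y1 membership lemmas (the set-building folds)
lemma pv_memfold_pts_mono (pts : List (Int × Int)) : ∀ (s : PySem.Set Int) (x : Int), x ∈ s →
    x ∈ pts.foldl (fun s p => PySem.Set.add s p.2) s := by
  induction pts with
  | nil => intro s x h; exact h
  | cons p pts ih =>
    intro s x h
    exact ih _ x ((PySem.Set.mem_add _ _ _).mpr (Or.inl h))

lemma pv_memfold_pts (pts : List (Int × Int)) : ∀ (s : PySem.Set Int) (p : Int × Int), p ∈ pts →
    p.2 ∈ pts.foldl (fun s p => PySem.Set.add s p.2) s := by
  induction pts with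
  | nil => intro s p h; cases h
  | cons q pts ih =>
    intro s p h
    rcases List.mem_cons.mp h with rfl | h'
    · exact pv_memfold_pts_mono pts _ _ ((PySem.Set.mem_add _ _ _).mpr (Or.inr rfl))
    · exact ih _ p h'

lemma pv_memfold_qrs_mono (qrs : List (Int × Int × Int × Int)) : ∀ (s : PySem.Set Int) (x : Int),
    x ∈ s → x ∈ qrs.foldl (fun s q => PySem.Set.add (PySem.Set.add s q.2.1) q.2.2.2) s := by
  induction qrs with
  | nil => intro s x h; exact h
  | cons q qrs ih =>
    intro s x h
    exact ih _ x ((PySem.Set.mem_add _ _ _).mpr (Or.inl ((PySem.Set.mem_add _ _ _).mpr (Or.inl h))))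

lemma pv_memfold_qrs (qrs : List (Int × Int × Int × Int)) : ∀ (s : PySem.Set Int)
    (q : Int × Int × Int × Int), q ∈ qrs →
    q.2.1 ∈ qrs.foldl (fun s q => PySem.Set.add (PySem.Set.add s q.2.1) q.2.2.2) s ∧
    q.2.2.2 ∈ qrs.foldl (fun s q => PySem.Set.add (PySem.Set.add s q.2.1) q.2.2.2) s := by
  induction qrs with
  | nil => intro s q h; cases h
  | cons r qrs ih =>
    intro s q h
    rcases List.mem_cons.mp h with rfl | h'
    · constructor
      · exact pv_memfold_qrs_mono qrs _ _
          ((PySem.Set.mem_add _ _ _).mpr (Or.inl ((PySem.Set.mem_add _ _ _).mpr (Or.inr rfl))))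
      · exact pv_memfold_qrs_mono qrs _ _ ((PySem.Set.mem_add _ _ _).mpr (Or.inr rfl))
    · exact ih _ q h'

-- the events built for the queries
def qEvs (Y : List Int) (iq : Int × Int × Int × Int × Int) : List Ev :=
  [(iq.2.2.2.1, PySem.List.bisectLeft Y iq.2.2.2.2 + 1, iq.1, 1),
   (iq.2.1 - 1, PySem.List.bisectLeft Y iq.2.2.1 + 1 - 1, iq.1, 1),
   (iq.2.1 - 1, PySem.List.bisectLeft Y iq.2.2.2.2 + 1, iq.1, 2),
   (iq.2.2.2.1, PySem.List.bisectLeft Y iq.2.2.1 + 1 - 1, iq.1, 2)]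

def pEv (Y : List Int) (ip : Int × Int × Int) : Ev :=
  (ip.2.1, PySem.List.bisectLeft Y ip.2.2 + 1, ip.1, 0)

-- the count at a query corner, in terms of the points
lemma pv_cnt_corner (Y : List Int) (pts : List (Int × Int)) (qrs : List (Int × Int × Int × Int))
    (X : Int) (yb : Nat) :
    cnt ((PySem.List.enumerate pts 0).map (pEv Y)
          ++ (PySem.List.enumerate qrs 0).flatMap (qEvs Y)) (X, yb, 0, 0)
      = (pts.countP (fun p =>
          decide (p.1 ≤ X) && decide (PySem.List.bisectLeft Y p.2 + 1 < yb + 1)) : Int) := by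
  rw [cnt, insEvs, List.filter_append]
  have h1 : ((PySem.List.enumerate pts 0).map (pEv Y)).filter (fun e => e.2.2.2 == 0)
      = (PySem.List.enumerate pts 0).map (pEv Y) := by
    rw [List.filter_eq_self]
    intro e he
    obtain ⟨ip, _, rfl⟩ := List.mem_map.mp he
    rfl
  have h2 : ((PySem.List.enumerate qrs 0).flatMap (qEvs Y)).filter (fun e => e.2.2.2 == 0)
      = [] := by
    rw [List.filter_eq_nil_iff]
    intro e he
    obtain ⟨iq, _, hin⟩ := List.mem_flatMap.mp he
    simp only [qEvs, List.mem_cons, List.mem_singleton, List.not_mem_nil, or_false] at hin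
    rcases hin with rfl | rfl | rfl | rfl <;> simp
  rw [h1, h2, List.append_nil, List.countP_map]
  have h3 : List.countP (fun ip : Int × Int × Int =>
        decide (ip.2.1 ≤ X) && decide (PySem.List.bisectLeft Y ip.2.2 + 1 < yb + 1))
        (PySem.List.enumerate pts 0)
      = List.countP (fun p =>
          decide (p.1 ≤ X) && decide (PySem.List.bisectLeft Y p.2 + 1 < yb + 1)) pts :=
    pv_countP_enumerate
      (fun p => decide (p.1 ≤ X) && decide (PySem.List.bisectLeft Y p.2 + 1 < yb + 1)) pts 0
  exact congrArg Nat.cast h3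

-- the inner 4-event contribution of one enumerated query
lemma pv_inner_sum (Y : List Int) (op' : List Ev) (i : Nat) (kq : Int × Int × Int × Int × Int) :
    ((qEvs Y kq).map (fun e =>
        if e.2.2.2 ≠ 0 ∧ e.2.2.1 = (i : Int) then sgn e * cnt op' e else 0)).sum
    = if kq.1 = (i : Int) then
        (cnt op' (kq.2.2.2.1, PySem.List.bisectLeft Y kq.2.2.2.2 + 1, 0, 0)
         + cnt op' (kq.2.1 - 1, PySem.List.bisectLeft Y kq.2.2.1 + 1 - 1, 0, 0))
         - cnt op' (kq.2.1 - 1, PySem.List.bisectLeft Y kq.2.2.2.2 + 1, 0, 0)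
         - cnt op' (kq.2.2.2.1, PySem.List.bisectLeft Y kq.2.2.1 + 1 - 1, 0, 0)
      else 0 := by
  rw [qEvs]
  simp only [List.map_cons, List.map_nil, List.sum_cons, List.sum_nil, add_zero]
  have c1 : cnt op' (kq.2.2.2.1, PySem.List.bisectLeft Y kq.2.2.2.2 + 1, kq.1, 1)
      = cnt op' (kq.2.2.2.1, PySem.List.bisectLeft Y kq.2.2.2.2 + 1, 0, 0) := rfl
  have c2 : cnt op' (kq.2.1 - 1, PySem.List.bisectLeft Y kq.2.2.1 + 1 - 1, kq.1, 1)
      = cnt op' (kq.2.1 - 1, PySem.List.bisectLeft Y kq.2.2.1 + 1 - 1, 0, 0) := rfl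
  have c3 : cnt op' (kq.2.1 - 1, PySem.List.bisectLeft Y kq.2.2.2.2 + 1, kq.1, 2)
      = cnt op' (kq.2.1 - 1, PySem.List.bisectLeft Y kq.2.2.2.2 + 1, 0, 0) := rfl
  have c4 : cnt op' (kq.2.2.2.1, PySem.List.bisectLeft Y kq.2.2.1 + 1 - 1, kq.1, 2)
      = cnt op' (kq.2.2.2.1, PySem.List.bisectLeft Y kq.2.2.1 + 1 - 1, 0, 0) := rfl
  by_cases hk : kq.1 = (i : Int)
  · rw [if_pos hk]
    simp only [sgn, hk]
    norm_num
    have d1 : cnt op' (kq.2.2.2.1, PySem.List.bisectLeft Y kq.2.2.2.2 + 1, (i:Int), 1)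
        = cnt op' (kq.2.2.2.1, PySem.List.bisectLeft Y kq.2.2.2.2 + 1, 0, 0) := rfl
    have d2 : cnt op' (kq.2.1 - 1, PySem.List.bisectLeft Y kq.2.2.1, (i:Int), 1)
        = cnt op' (kq.2.1 - 1, PySem.List.bisectLeft Y kq.2.2.1, 0, 0) := rfl
    have d3 : cnt op' (kq.2.1 - 1, PySem.List.bisectLeft Y kq.2.2.2.2 + 1, (i:Int), 2)
        = cnt op' (kq.2.1 - 1, PySem.List.bisectLeft Y kq.2.2.2.2 + 1, 0, 0) := rfl
    have d4 : cnt op' (kq.2.2.2.1, PySem.List.bisectLeft Y kq.2.2.1, (i:Int), 2)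
        = cnt op' (kq.2.2.2.1, PySem.List.bisectLeft Y kq.2.2.1, 0, 0) := rfl
    rw [d1, d2, d3, d4]
    ring
  · rw [if_neg hk]
    simp [hk]

-- per-query value: the four corner counts equal B's per-point product sum
lemma pv_query_value (Y : List Int) (hY : Y.Pairwise (· ≤ ·))
    (pts : List (Int × Int)) (qrs : List (Int × Int × Int × Int))
    (q : Int × Int × Int × Int)
    (hpy : ∀ p ∈ pts, p.2 ∈ Y) (hq2 : q.2.2.2 ∈ Y) :
    (cnt ((PySem.List.enumerate pts 0).map (pEv Y)
          ++ (PySem.List.enumerate qrs 0).flatMap (qEvs Y))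
        (q.2.2.1, PySem.List.bisectLeft Y q.2.2.2 + 1, 0, 0)
     + cnt ((PySem.List.enumerate pts 0).map (pEv Y)
          ++ (PySem.List.enumerate qrs 0).flatMap (qEvs Y))
        (q.1 - 1, PySem.List.bisectLeft Y q.2.1 + 1 - 1, 0, 0))
     - cnt ((PySem.List.enumerate pts 0).map (pEv Y)
          ++ (PySem.List.enumerate qrs 0).flatMap (qEvs Y))
        (q.1 - 1, PySem.List.bisectLeft Y q.2.2.2 + 1, 0, 0)
     - cnt ((PySem.List.enumerate pts 0).map (pEv Y)
          ++ (PySem.List.enumerate qrs 0).flatMap (qEvs Y))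
        (q.2.2.1, PySem.List.bisectLeft Y q.2.1 + 1 - 1, 0, 0)
    = pts.foldl
        (fun s p =>
          s + ((if p.1 ≤ q.2.2.1 then (1 : Int) else 0) - (if p.1 < q.1 then 1 else 0)) *
              ((if p.2 ≤ q.2.2.2 then (1 : Int) else 0) - (if p.2 < q.2.1 then 1 else 0))) 0 := by
  rw [pv_cnt_corner, pv_cnt_corner, pv_cnt_corner, pv_cnt_corner,
      PySem.List.foldl_add, zero_add]
  have e1 : pts.countP (fun p => decide (p.1 ≤ q.2.2.1)
        && decide (PySem.List.bisectLeft Y p.2 + 1 < (PySem.List.bisectLeft Y q.2.2.2 + 1) + 1))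
      = pts.countP (fun p => decide (p.1 ≤ q.2.2.1) && decide (p.2 ≤ q.2.2.2)) := by
    apply List.countP_congr
    intro p hp
    have := pv_bl_le_iff Y hY p.2 q.2.2.2 hq2
    simp only [Bool.and_eq_true, decide_eq_true_eq]
    omega
  have e2 : pts.countP (fun p => decide (p.1 ≤ q.1 - 1)
        && decide (PySem.List.bisectLeft Y p.2 + 1 < (PySem.List.bisectLeft Y q.2.1 + 1 - 1) + 1))
      = pts.countP (fun p => decide (p.1 < q.1) && decide (p.2 < q.2.1)) := by
    apply List.countP_congr
    intro p hp
    have := pv_bl_lt_iff Y hY p.2 q.2.1 (hpy p hp)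
    simp only [Bool.and_eq_true, decide_eq_true_eq]
    omega
  have e3 : pts.countP (fun p => decide (p.1 ≤ q.1 - 1)
        && decide (PySem.List.bisectLeft Y p.2 + 1 < (PySem.List.bisectLeft Y q.2.2.2 + 1) + 1))
      = pts.countP (fun p => decide (p.1 < q.1) && decide (p.2 ≤ q.2.2.2)) := by
    apply List.countP_congr
    intro p hp
    have := pv_bl_le_iff Y hY p.2 q.2.2.2 hq2
    simp only [Bool.and_eq_true, decide_eq_true_eq]
    omega
  have e4 : pts.countP (fun p => decide (p.1 ≤ q.2.2.1)
        && decide (PySem.List.bisectLeft Y p.2 + 1 < (PySem.List.bisectLeft Y q.2.1 + 1 - 1) + 1))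
      = pts.countP (fun p => decide (p.1 ≤ q.2.2.1) && decide (p.2 < q.2.1)) := by
    apply List.countP_congr
    intro p hp
    have := pv_bl_lt_iff Y hY p.2 q.2.1 (hpy p hp)
    simp only [Bool.and_eq_true, decide_eq_true_eq]
    omega
  rw [e1, e2, e3, e4]
  exact pv_countAlgebra q.1 q.2.1 q.2.2.1 q.2.2.2 pts

def opAll (Y : List Int) (pts : List (Int × Int)) (qrs : List (Int × Int × Int × Int)) : List Ev :=
  (PySem.List.enumerate pts 0).map (pEv Y) ++ (PySem.List.enumerate qrs 0).flatMap (qEvs Y)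

lemma pv_opAll_P (Y : List Int) (pts : List (Int × Int)) (e : Ev)
    (he : e ∈ (PySem.List.enumerate pts 0).map (pEv Y)) : e.2.2.2 = 0 := by
  obtain ⟨ip, _, rfl⟩ := List.mem_map.mp he
  rfl

lemma pv_opAll_Q (Y : List Int) (hY : Y.Pairwise (· ≤ ·))
    (qrs : List (Int × Int × Int × Int)) (e : Ev)
    (he : e ∈ (PySem.List.enumerate qrs 0).flatMap (qEvs Y)) :
    e.2.2.2 ≠ 0 ∧ (∃ k : Nat, k < qrs.length ∧ e.2.2.1 = (k : Int)) ∧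
      e.2.1 ≤ Y.length + 1 := by
  obtain ⟨iq, hiq, hin⟩ := List.mem_flatMap.mp he
  obtain ⟨k, hk, rfl⟩ := (PySem.List.mem_enumerate_iff _ _ _).mp hiq
  simp only [qEvs, List.mem_cons, List.mem_singleton, List.not_mem_nil, or_false] at hin
  have hb1 := (PySem.List.bisectLeft_spec Y (qrs[k].2.2.2) hY).1
  have hb2 := (PySem.List.bisectLeft_spec Y (qrs[k].2.1) hY).1
  rcases hin with rfl | rfl | rfl | rfl <;>
    exact ⟨by simp, ⟨k, hk, by simp⟩, by simp; omega⟩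

-- the central pipeline lemma: A's sweep, with the sorted coordinate list abstracted
lemma pipeline (pts : List (Int × Int)) (qrs : List (Int × Int × Int × Int)) (Y : List Int)
    (hY : Y.Pairwise (· ≤ ·))
    (hpy : ∀ p ∈ pts, p.2 ∈ Y) (hq2 : ∀ q ∈ qrs, q.2.2.2 ∈ Y) :
    ((PySem.List.enumerate
        (PySem.List.sorted
          ((PySem.List.enumerate qrs 0).foldl
            (fun acc iq =>
              acc ++ [(iq.2.2.2.1, PySem.List.bisectLeft Y iq.2.2.2.2 + 1, iq.1, 1),
                      (iq.2.1 - 1, PySem.List.bisectLeft Y iq.2.2.1 + 1 - 1, iq.1, 1),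
                      (iq.2.1 - 1, PySem.List.bisectLeft Y iq.2.2.2.2 + 1, iq.1, 2),
                      (iq.2.2.2.1, PySem.List.bisectLeft Y iq.2.2.1 + 1 - 1, iq.1, 2)])
            ((PySem.List.enumerate pts 0).foldl
              (fun acc ip => acc ++ [(ip.2.1, PySem.List.bisectLeft Y ip.2.2 + 1, ip.1, 0)]) []))
          (fun e => e.1) false) 0).foldl
      (fun (s : List Int × List Int) ie =>
        let e := ie.2
        if e.2.2.2 = 0 then (fenUpdate s.1 e.2.1 1, s.2)
        else if e.2.2.2 = 1 then
          (s.1, PySem.List.pySetD s.2 e.2.2.1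
                  (PySem.List.pyGetD s.2 e.2.2.1 0 + fenQueryLoop s.1 0 (e.2.1 + 1)))
        else
          (s.1, PySem.List.pySetD s.2 e.2.2.1
                  (PySem.List.pyGetD s.2 e.2.2.1 0 - fenQueryLoop s.1 0 (e.2.1 + 1))))
      (fenInit (List.replicate (Y.length + 10) (0 : Int)), List.replicate qrs.length (0 : Int))).2
    = solve_alt pts qrs := by
  have hconv : (fun (s : List Int × List Int) (ie : Int × Ev) =>
        let e := ie.2
        if e.2.2.2 = 0 then (fenUpdate s.1 e.2.1 1, s.2)
        else if e.2.2.2 = 1 then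
          (s.1, PySem.List.pySetD s.2 e.2.2.1
                  (PySem.List.pyGetD s.2 e.2.2.1 0 + fenQueryLoop s.1 0 (e.2.1 + 1)))
        else
          (s.1, PySem.List.pySetD s.2 e.2.2.1
                  (PySem.List.pyGetD s.2 e.2.2.1 0 - fenQueryLoop s.1 0 (e.2.1 + 1))))
      = (fun acc ie => stepF acc ie.2) := rfl
  rw [hconv]
  rw [PySem.List.foldl_append_singleton_eq_map, List.nil_append,
      show (fun ip : Int × Int × Int => (ip.2.1, PySem.List.bisectLeft Y ip.2.2 + 1, ip.1, 0)) = pEv Y from rfl,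
      PySem.List.foldl_append_eq_flatMap,
      show (fun iq : Int × Int × Int × Int × Int =>
        [(iq.2.2.2.1, PySem.List.bisectLeft Y iq.2.2.2.2 + 1, iq.1, 1),
         (iq.2.1 - 1, PySem.List.bisectLeft Y iq.2.2.1 + 1 - 1, iq.1, 1),
         (iq.2.1 - 1, PySem.List.bisectLeft Y iq.2.2.2.2 + 1, iq.1, 2),
         (iq.2.2.2.1, PySem.List.bisectLeft Y iq.2.2.1 + 1 - 1, iq.1, 2)]) = qEvs Y from rfl,
      pv_foldl_enumerate_snd stepF, fenInit_zeros]
  -- names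
  set P : List Ev := (PySem.List.enumerate pts 0).map (pEv Y) with hPdef
  set Q : List Ev := (PySem.List.enumerate qrs 0).flatMap (qEvs Y) with hQdef
  set opS : List Ev := PySem.List.sorted (P ++ Q) (fun e => e.1) false with hSdef
  have hperm : opS.Perm (P ++ Q) := PySem.List.sorted_perm _ _ _
  have hpw : opS.Pairwise EvRel :=
    sortedOp_pairwise P Q (fun e he => pv_opAll_P Y pts e he)
      (fun e he => (pv_opAll_Q Y hY qrs e he).1)
  have hmem : ∀ e ∈ opS, e ∈ P ++ Q := fun e he => hperm.mem_iff.mp he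
  have hbnd : ∀ e ∈ opS, e.2.2.2 ≠ 0 → e.2.1 + 1 ≤ Y.length + 10 := by
    intro e he ht
    rcases List.mem_append.mp (hmem e he) with h | h
    · exact absurd (pv_opAll_P Y pts e h) ht
    · have := (pv_opAll_Q Y hY qrs e h).2.2; omega
  have hidx : ∀ e ∈ opS, e.2.2.2 ≠ 0 →
      0 ≤ e.2.2.1 ∧ e.2.2.1 < ((List.replicate qrs.length (0:Int)).length : Int) := by
    intro e he ht
    rcases List.mem_append.mp (hmem e he) with h | h
    · exact absurd (pv_opAll_P Y pts e h) ht
    · obtain ⟨k, hk, hke⟩ := (pv_opAll_Q Y hY qrs e h).2.1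
      rw [List.length_replicate]
      omega
  have hmain := mainLemma (Y.length + 10) opS [] (List.replicate qrs.length 0)
      (by simpa using hpw) (fun e he ht => hbnd e he ht)
  simp only [bitSt, insEvs, List.filter_nil, List.foldl_nil, List.nil_append] at hmain
  rw [hmain]
  -- now: accum opS res0 opS = solve_alt pts qrs
  rw [solve_alt, PySem.List.foldl_append_singleton_eq_map, List.nil_append]
  apply List.ext_getElem
  · rw [accum_length, List.length_replicate, List.length_map]
  · intro i hi1 hi2
    rw [List.length_map] at hi2
    rw [← List.getD_eq_getElem (accum opS (List.replicate qrs.length 0) opS) 0 hi1,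
        List.getElem_map]
    have hilen : i < (List.replicate qrs.length (0:Int)).length := by
      rw [List.length_replicate]; exact hi2
    rw [accum_getD opS opS (List.replicate qrs.length 0) i hilen hidx,
        pv_getD_replicate0, zero_add]
    -- replace cnt opS by cnt (P ++ Q)
    rw [List.map_congr_left (fun e (he : e ∈ opS) => by
      rw [pv_cnt_perm opS (P ++ Q) hperm e])]
    -- sum over opS = sum over P ++ Q
    rw [(hperm.map _).sum_eq, List.map_append, List.sum_append]
    have hPzero : ((P.map (fun e =>
        if e.2.2.2 ≠ 0 ∧ e.2.2.1 = (i : Int) then sgn e * cnt (P ++ Q) e else 0))).sum = 0 := by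
      apply List.sum_eq_zero
      intro x hx
      obtain ⟨e, he, rfl⟩ := List.mem_map.mp hx
      rw [if_neg]
      rintro ⟨h, _⟩
      exact h (pv_opAll_P Y pts e he)
    rw [hPzero, zero_add, hQdef, pv_sum_map_flatMap,
        List.map_congr_left (l := PySem.List.enumerate qrs 0)
          (g := fun kq : Int × Int × Int × Int × Int =>
            if kq.1 = (i : Int) then
              (cnt (P ++ Q) (kq.2.2.2.1, PySem.List.bisectLeft Y kq.2.2.2.2 + 1, 0, 0)
               + cnt (P ++ Q) (kq.2.1 - 1, PySem.List.bisectLeft Y kq.2.2.1 + 1 - 1, 0, 0))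
               - cnt (P ++ Q) (kq.2.1 - 1, PySem.List.bisectLeft Y kq.2.2.2.2 + 1, 0, 0)
               - cnt (P ++ Q) (kq.2.2.2.1, PySem.List.bisectLeft Y kq.2.2.1 + 1 - 1, 0, 0)
            else 0)
          (fun kq _ => pv_inner_sum Y (P ++ Q) i kq),
        pv_sum_enum_single (fun q : Int × Int × Int × Int =>
            (cnt (P ++ Q) (q.2.2.1, PySem.List.bisectLeft Y q.2.2.2 + 1, 0, 0)
             + cnt (P ++ Q) (q.1 - 1, PySem.List.bisectLeft Y q.2.1 + 1 - 1, 0, 0))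
             - cnt (P ++ Q) (q.1 - 1, PySem.List.bisectLeft Y q.2.2.2 + 1, 0, 0)
             - cnt (P ++ Q) (q.2.2.1, PySem.List.bisectLeft Y q.2.1 + 1 - 1, 0, 0))
          (i : Int) (0, 0, 0, 0) qrs 0,
        if_pos (show (0:Int) ≤ (i:Int) - 0 ∧ (i:Int) - 0 < (qrs.length : Int) by
          constructor <;> omega),
        show ((i:Int) - 0).toNat = i by omega,
        List.getD_eq_getElem qrs (0, 0, 0, 0) (by simpa using hi2)]
    rw [hPdef, hQdef]
    exact pv_query_value Y hY pts qrs qrs[i] hpy (hq2 qrs[i] (List.getElem_mem hi2))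

set_option maxHeartbeats 2000000 in
theorem solve_main : ∀ (pts : List (Int × Int)) (qrs : List (Int × Int × Int × Int)),
    solve pts qrs = solve_alt pts qrs := by
  intro pts qrs
  exact pipeline pts qrs
    (PySem.List.sorted
      (qrs.foldl (fun s q => PySem.Set.add (PySem.Set.add s q.2.1) q.2.2.2)
        (pts.foldl (fun s p => PySem.Set.add s p.2) PySem.Set.empty))
      (fun y => y) false)
    (PySem.List.sorted_pairwise _ _)
    (fun p hp => (PySem.List.mem_sorted _ _ _ _).mpr
      (pv_memfold_qrs_mono qrs _ _ (pv_memfold_pts pts _ p hp)))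
    (fun q hq => (PySem.List.mem_sorted _ _ _ _).mpr (pv_memfold_qrs qrs _ q hq).2)

-- ===== VERDICT (by name: the statement is the Claim_ definition above) =====
theorem solve_spec : Claim_equal_solve := by
  intro pts qrs _
  unfold Spec_solve
  exact solve_main pts qrs
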